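-- pv_equiv track=rewrite | github.com/kaienlin/Discrete-Intersection-Simulator | environment/env.py | gen_int_partition
-- ===== SOURCE A (Python) =====
-- from typing import Iterable, Set, Dict, List, Tuple
--
-- def gen_int_partition(n: int, k: int):
--     res: Set[Tuple[int]] = set()
--     def __gen(sum: int, L: List[int]) -> None:
--         if len(L) == k:
--             res.add(tuple(L))
--             return
--         for i in range(0, n - sum + 1):
--             L.append(i)
--             __gen(sum + i, L)
--             L.pop()
--     __gen(0, [])
--     return res
-- ===== SOURCE B (Python) =====
-- def gen_int_partition(n: int, k: int):
--     # iterative layer-by-layer build-up instead of recursive backtracking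
--     states = [((), 0)]
--     for _ in range(k):
--         if not states:
--             break
--         states = [(t + (i,), s + i) for (t, s) in states for i in range(0, n - s + 1)]
--     return set(t for t, _ in states)
-- ===== Notes on version B (the rewrite author's own statement) =====
-- stated objective: alternative
-- what changed: Replaced the recursive backtracking with mutable list state by an iterative layer-by-layer worklist: loop k times, each pass extending every (tuple, sum) state by all i in range(n - sum + 1).
-- outside the precondition, e.g. on gen_int_partition(-1, -1): A returns set(), B returns {()}
import Mathlib
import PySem

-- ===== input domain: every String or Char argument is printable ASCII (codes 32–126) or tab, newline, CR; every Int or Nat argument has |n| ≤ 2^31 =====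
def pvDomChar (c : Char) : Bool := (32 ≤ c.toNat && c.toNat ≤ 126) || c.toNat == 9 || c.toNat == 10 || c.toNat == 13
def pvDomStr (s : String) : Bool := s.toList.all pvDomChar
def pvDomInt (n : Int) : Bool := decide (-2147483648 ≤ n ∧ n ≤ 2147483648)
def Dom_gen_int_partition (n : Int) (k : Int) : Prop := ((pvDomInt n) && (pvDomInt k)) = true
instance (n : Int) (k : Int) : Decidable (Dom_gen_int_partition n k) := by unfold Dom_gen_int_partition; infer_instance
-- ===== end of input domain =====

-- B replaces A's recursive backtracking by an iterative layer-by-layer worklist build-up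
-- (same output set, in the same order); equivalence is about the return value.


-- ===== PORT A =====
def pvGenA (n : Int) (k : Int) : Nat → Int → List Int → List (List Int) → List (List Int)
  | fuel, sum, L, res =>
    if (L.length : Int) = k then PySem.Set.add res L
    else match fuel with
      | 0 => res
      | fuel' + 1 =>
        (PySem.List.pyRange 0 (n - sum + 1) 1).foldl
          (fun res i => pvGenA n k fuel' (sum + i) (L ++ [i]) res) res

-- fuel k.toNat bounds the recursion depth: with len(L) growing by 1 per call the
-- Python recursion reaches len(L) = k after exactly k calls (k ≥ 0; see Pre_ for k < 0).
def gen_int_partition (n : Int) (k : Int) : List (List Int) :=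
  pvGenA n k k.toNat 0 [] []

-- ===== PORT B =====
def pvStep (n : Int) (states : List (List Int × Int)) : List (List Int × Int) :=
  states.flatMap (fun ts =>
    (PySem.List.pyRange 0 (n - ts.2 + 1) 1).map (fun i => (ts.1 ++ [i], ts.2 + i)))

-- the loop with early break once the worklist is empty
def pvIterB (n : Int) : Nat → List (List Int × Int) → List (List Int × Int)
  | 0, st => st
  | f + 1, st => if st = [] then st else pvIterB n f (pvStep n st)

def gen_int_partition_alt (n : Int) (k : Int) : List (List Int) :=
  PySem.Set.ofList ((pvIterB n k.toNat [(([] : List Int), (0 : Int))]).map Prod.fst)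

-- ===== PRECONDITION & SPEC =====
-- Pre_ excludes only k < 0 (a nonsensical negative tuple length): there, for n >= 0, A's
-- recursion never reaches len(L) == k and A exhausts the recursion limit (RecursionError);
-- for n < 0 A happens to return set() while B returns {()} — a defensible-corner artefact
-- of A's len(L) == k test never firing (see cites).
def Pre_gen_int_partition (n : Int) (k : Int) : Prop := 0 ≤ k
instance (n : Int) (k : Int) : Decidable (Pre_gen_int_partition n k) := by unfold Pre_gen_int_partition; infer_instance
def pvWitness_gen_int_partition : Int × Int := (3, 2)

def Spec_gen_int_partition (n : Int) (k : Int) (out : List (List Int)) : Prop := out = gen_int_partition_alt n k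
instance (n : Int) (k : Int) (out : List (List Int)) : Decidable (Spec_gen_int_partition n k out) := by unfold Spec_gen_int_partition; infer_instance

-- ===== CLAIM (what is proved, stated in full; the proofs are below) =====
def Claim_equal_gen_int_partition : Prop := ∀ (n : Int) (k : Int), Dom_gen_int_partition n k → Pre_gen_int_partition n k → Spec_gen_int_partition n k (gen_int_partition n k)

-- ===== LEMMAS AND PROOFS =====

-- pure description of the search tree: all length-`fuel` suffixes with running sum bounded by n
def pvDfs (n : Int) : Nat → Int → List (List Int)
  | 0, _ => [[]]
  | f + 1, sum =>
      (PySem.List.pyRange 0 (n - sum + 1) 1).flatMap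
        (fun i => (pvDfs n f (sum + i)).map (i :: ·))

lemma pvDfs_A (n k : Int) : ∀ (fuel : Nat) (sum : Int) (L : List Int) (res : List (List Int)),
    (L.length : Int) + fuel = k →
    (∀ s ∈ pvDfs n fuel sum, L ++ s ∉ res) →
    pvGenA n k fuel sum L res = res ++ (pvDfs n fuel sum).map (L ++ ·) := by
  intro fuel
  induction fuel with
  | zero =>
    intro sum L res hlen hmem
    have hLk : (L.length : Int) = k := by simpa using hlen
    have hnot : L ∉ res := by
      have := hmem [] (by simp [pvDfs])
      simpa using this
    simp [pvGenA, hLk, pvDfs, PySem.Set.add_of_not_mem hnot]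
  | succ f ih =>
    intro sum L res hlen hmem
    have hne : ¬ ((L.length : Int) = k) := by omega
    rw [pvGenA]
    simp only [hne, if_false]
    have key : ∀ (l : List Int) (res : List (List Int)), l.Nodup →
        (∀ i ∈ l, ∀ s ∈ pvDfs n f (sum + i), L ++ i :: s ∉ res) →
        l.foldl (fun res i => pvGenA n k f (sum + i) (L ++ [i]) res) res
          = res ++ l.flatMap (fun i => (pvDfs n f (sum + i)).map (fun s => L ++ i :: s)) := by
      intro l
      induction l with
      | nil => intro res _ _; simp
      | cons i l ihl =>
        intro res hnd hrm
        have hstep : pvGenA n k f (sum + i) (L ++ [i]) res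
            = res ++ (pvDfs n f (sum + i)).map (fun s => L ++ i :: s) := by
          have := ih (sum + i) (L ++ [i]) res (by simp; omega)
            (by intro s hs; simpa [List.append_assoc] using hrm i (by simp) s hs)
          simpa [List.append_assoc] using this
        rw [List.foldl_cons, hstep, ihl _ (hnd.of_cons)]
        · simp
        · intro j hj s hs
          simp only [List.mem_append, List.mem_map]
          rintro (h | ⟨s', hs', he⟩)
          · exact hrm j (by simp [hj]) s hs h
          · have hij : i ≠ j := by
              rintro rfl; exact (List.nodup_cons.mp hnd).1 hj
            have := List.append_cancel_left he
            simp at this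
            exact hij this.1
    rw [key _ res (PySem.List.nodup_pyRange_one _ _) ?_]
    · rw [pvDfs, List.map_flatMap]
      refine congrArg (res ++ ·) (List.flatMap_congr (fun i _ => ?_))
      simp [List.map_map, Function.comp_def]
    · intro i hi s hs
      exact hmem (i :: s)
        (by rw [pvDfs]; exact List.mem_flatMap.mpr ⟨i, hi, List.mem_map.mpr ⟨s, hs, rfl⟩⟩)

lemma pvDfs_nodup (n : Int) : ∀ (f : Nat) (sum : Int), (pvDfs n f sum).Nodup := by
  intro f
  induction f with
  | zero => intro sum; simp [pvDfs]
  | succ f ih =>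
    intro sum
    rw [pvDfs, List.nodup_flatMap]
    refine ⟨fun i _ => List.Nodup.map (List.cons_injective) (ih (sum + i)), ?_⟩
    refine (PySem.List.pairwise_lt_pyRange_one _ _).imp ?_
    intro i j hij x hx hy
    obtain ⟨s, _, rfl⟩ := List.mem_map.mp hx
    obtain ⟨s', _, he⟩ := List.mem_map.mp hy
    exact absurd (List.head_eq_of_cons_eq he.symm) (by exact fun h => absurd h (ne_of_lt hij))

lemma pvStep_flatMap (n : Int) : ∀ (f : Nat) (states : List (List Int × Int)),
    (pvStep n)^[f] states = states.flatMap (fun ts => (pvStep n)^[f] [ts]) := by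
  intro f
  induction f with
  | zero => intro states; simp
  | succ f ih =>
    intro states
    have hsingle : pvStep n states = states.flatMap (fun ts => pvStep n [ts]) := by
      simp [pvStep]
    calc (pvStep n)^[f + 1] states
        = (pvStep n states).flatMap (fun ts => (pvStep n)^[f] [ts]) := by
          rw [Function.iterate_succ_apply, ih]
      _ = states.flatMap (fun ts => (pvStep n [ts]).flatMap (fun t => (pvStep n)^[f] [t])) := by
          rw [hsingle, List.flatMap_assoc]
      _ = states.flatMap (fun ts => (pvStep n)^[f + 1] [ts]) :=
          List.flatMap_congr (fun ts _ => by rw [Function.iterate_succ_apply, ih])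

lemma pvLayer (n : Int) : ∀ (f : Nat) (sum : Int) (L : List Int),
    (((pvStep n)^[f] [(L, sum)]).map Prod.fst) = (pvDfs n f sum).map (L ++ ·) := by
  intro f
  induction f with
  | zero => intro sum L; simp [pvDfs]
  | succ f ih =>
    intro sum L
    rw [Function.iterate_succ_apply]
    have h1 : pvStep n [(L, sum)]
        = (PySem.List.pyRange 0 (n - sum + 1) 1).map (fun i => (L ++ [i], sum + i)) := by
      simp [pvStep]
    rw [h1, pvStep_flatMap, List.map_flatMap, List.flatMap_map, pvDfs, List.map_flatMap]
    refine List.flatMap_congr (fun i _ => ?_)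
    simp [ih, List.map_map, Function.comp_def, List.append_assoc]

lemma pvIterB_iterate (n : Int) : ∀ (f : Nat) (st : List (List Int × Int)),
    pvIterB n f st = (pvStep n)^[f] st := by
  intro f
  induction f with
  | zero => intro st; rfl
  | succ f ih =>
    intro st
    rw [pvIterB]
    split_ifs with h
    · subst h
      have hnil : ∀ g, (pvStep n)^[g] ([] : List (List Int × Int)) = [] := by
        intro g
        induction g with
        | zero => rfl
        | succ g ihg => rw [Function.iterate_succ_apply]; exact ihg
      exact (hnil _).symm
    · rw [Function.iterate_succ_apply]; exact ih _

-- ===== VERDICT (by name: the statement is the Claim_ definition above) =====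
theorem gen_int_partition_spec : Claim_equal_gen_int_partition := by
  intro n k _ hk
  unfold Spec_gen_int_partition gen_int_partition gen_int_partition_alt
  rw [pvIterB_iterate, pvLayer, pvDfs_A n k k.toNat 0 [] [] (by simp [Int.toNat_of_nonneg hk]) (by simp)]
  simp [PySem.Set.ofList_eq_self_of_nodup _ (pvDfs_nodup n k.toNat 0)]
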